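-- pv_equiv track=rewrite | github.com/vlartomov/work1 | rivermax/python_hosts_port.py | find_similar_serial_numbers
-- ===== SOURCE A (Python) =====
-- def find_similar_serial_numbers(target_host, all_hosts):
--     target_serial_numbers = set(all_hosts.get(target_host.lower(), []))  # Convert to lowercase for case-insensitive comparison
--     similar_hosts = {}
--
--     for host, serial_numbers in all_hosts.items():
--         if host == target_host.lower():  # Convert to lowercase for case-insensitive comparison
--             continue
--
--         common_serial_numbers = target_serial_numbers.intersection(set(serial_numbers))
--
--         if common_serial_numbers:
--             similar_hosts[host] = common_serial_numbers
--
--     return similar_hosts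
-- ===== SOURCE B (Python) =====
-- def find_similar_serial_numbers(target_host, all_hosts):
--     target = target_host.lower()
--     # inverted index: serial number -> list of hosts that carry it
--     owners = {}
--     for host, serial_numbers in all_hosts.items():
--         for s in serial_numbers:
--             owners.setdefault(s, []).append(host)
--     # walk the target's serials through the index
--     shared = {}
--     for s in set(all_hosts.get(target, [])):
--         for host in owners.get(s, []):
--             if host != target:
--                 shared.setdefault(host, set()).add(s)
--     # emit in the original host order
--     return {host: shared[host] for host in all_hosts if host in shared}
-- ===== Notes on version B (the rewrite author's own statement) =====
-- stated objective: faster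
-- what changed: B replaces A's per-host intersections with the whole target serial set by an inverted index (serial number -> hosts) built in one pass and walked once over the target's serials, then emits matches in the original host order; this avoids A's per-host work proportional to the target set.
import Mathlib
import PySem

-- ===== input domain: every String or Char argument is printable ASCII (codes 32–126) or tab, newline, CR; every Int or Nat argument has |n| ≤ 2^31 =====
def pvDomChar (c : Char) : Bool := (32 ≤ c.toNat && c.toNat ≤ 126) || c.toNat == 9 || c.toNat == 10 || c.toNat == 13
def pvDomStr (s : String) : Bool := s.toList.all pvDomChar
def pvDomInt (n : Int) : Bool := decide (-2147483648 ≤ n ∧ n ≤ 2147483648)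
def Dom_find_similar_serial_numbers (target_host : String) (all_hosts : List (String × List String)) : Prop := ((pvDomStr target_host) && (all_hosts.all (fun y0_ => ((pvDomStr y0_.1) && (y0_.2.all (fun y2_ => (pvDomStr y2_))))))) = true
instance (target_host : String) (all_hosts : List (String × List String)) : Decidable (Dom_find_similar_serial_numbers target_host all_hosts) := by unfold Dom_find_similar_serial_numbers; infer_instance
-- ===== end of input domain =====

-- B replaces A's per-host intersections with the target serial set by an inverted index
-- (serial -> hosts) built once and walked once over the target's serials; measured faster.

-- ===== PORT A =====
-- A: one pass over the hosts dict, intersecting the target's serial set with each host's serial set.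
def find_similar_serial_numbers (target_host : String) (all_hosts : List (String × List String)) : List (String × List String) :=
  let d := PySem.Dict.ofList all_hosts
  let t := PySem.Str.lower target_host
  let target_serial_numbers : PySem.Set String := PySem.Set.ofList (d.getD t [])
  let similar_hosts :=
    d.items.foldl (fun acc p =>
      if p.1 == t then acc
      else
        let common := PySem.Set.inter target_serial_numbers (PySem.Set.ofList p.2)
        if common.isEmpty then acc else acc.insert p.1 common)
      (PySem.Dict.empty : PySem.Dict String (List String))
  similar_hosts.items

-- ===== PORT B =====
-- helper: inverted index serial -> list of hosts carrying it (B's first loop)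
def fssOwners (items : List (String × List String)) : PySem.Dict String (List String) :=
  items.foldl (fun o p =>
      p.2.foldl (fun o s => o.modify s [] (fun hs => hs ++ [p.1])) o)
    PySem.Dict.empty

-- helper: host -> set of serials shared with the target (B's second loop)
def fssShared (t : String) (targets : List String) (owners : PySem.Dict String (List String)) :
    PySem.Dict String (List String) :=
  targets.foldl (fun sh s =>
      (owners.getD s []).foldl (fun sh h =>
          if h == t then sh else sh.modify h [] (fun st => PySem.Set.add st s)) sh)
    PySem.Dict.empty

def find_similar_serial_numbers_alt (target_host : String) (all_hosts : List (String × List String)) : List (String × List String) :=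
  let d := PySem.Dict.ofList all_hosts
  let t := PySem.Str.lower target_host
  let owners := fssOwners d.items
  let targets : PySem.Set String := PySem.Set.ofList (d.getD t [])
  let shared := fssShared t targets owners
  (d.items.foldl (fun acc p =>
      if shared.contains p.1 then acc.insert p.1 (shared.getD p.1 []) else acc)
    (PySem.Dict.empty : PySem.Dict String (List String))).items

-- ===== PRECONDITION & SPEC =====
def Spec_find_similar_serial_numbers (target_host : String) (all_hosts : List (String × List String)) (out : List (String × List String)) : Prop := out = find_similar_serial_numbers_alt target_host all_hosts
instance (target_host : String) (all_hosts : List (String × List String)) (out : List (String × List String)) : Decidable (Spec_find_similar_serial_numbers target_host all_hosts out) := by unfold Spec_find_similar_serial_numbers; infer_instance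

-- ===== CLAIM (what is proved, stated in full; the proofs are below) =====
def Claim_equal_find_similar_serial_numbers : Prop := ∀ (target_host : String) (all_hosts : List (String × List String)), Dom_find_similar_serial_numbers target_host all_hosts → Spec_find_similar_serial_numbers target_host all_hosts (find_similar_serial_numbers target_host all_hosts)

-- ===== LEMMAS AND PROOFS =====

theorem fss_set_add_of_mem {α : Type} [BEq α] [LawfulBEq α] (s : PySem.Set α) (x : α) (hx : x ∈ s) :
    s.add x = s := by
  have h : s.contains x = true := (PySem.Set.contains_iff s x).mpr hx
  simp only [PySem.Set.add, h, if_true]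

theorem fss_set_add_add_self {α : Type} [BEq α] [LawfulBEq α] (s : PySem.Set α) (x : α) :
    (s.add x).add x = s.add x :=
  fss_set_add_of_mem _ _ ((PySem.Set.mem_add s x x).mpr (Or.inr rfl))

-- membership in the per-host inner loop of fssOwners
theorem fss_mem_ownerAdd (sn : List String) (hostname : String)
    (o : PySem.Dict String (List String)) (s h : String) :
    (h ∈ (sn.foldl (fun o s' => o.modify s' [] (fun hs => hs ++ [hostname])) o).getD s []) ↔
      (h ∈ o.getD s [] ∨ (s ∈ sn ∧ h = hostname)) := by
  induction sn generalizing o with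
  | nil => simp
  | cons s' rest ih =>
    simp only [List.foldl_cons]
    rw [ih, PySem.Dict.getD_modify]
    by_cases hss : s = s'
    · subst hss
      simp [List.mem_append]; tauto
    · rw [if_neg hss]
      simp only [List.mem_cons]
      tauto

-- membership in the inverted index built by fssOwners (generalized accumulator)
theorem fss_mem_owners (l : List (String × List String))
    (o : PySem.Dict String (List String)) (s h : String) :
    (h ∈ (l.foldl (fun o p => p.2.foldl (fun o s' => o.modify s' [] (fun hs => hs ++ [p.1])) o) o).getD s []) ↔
      (h ∈ o.getD s [] ∨ ∃ p ∈ l, p.1 = h ∧ s ∈ p.2) := by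
  induction l generalizing o with
  | nil => simp
  | cons p rest ih =>
    simp only [List.foldl_cons]
    rw [ih, fss_mem_ownerAdd]
    simp only [List.exists_mem_cons_iff]
    constructor
    · rintro ((h1 | ⟨h1, rfl⟩) | ⟨q, hq, rfl, hs⟩)
      · exact Or.inl h1
      · exact Or.inr (Or.inl ⟨rfl, h1⟩)
      · exact Or.inr (Or.inr ⟨q, hq, rfl, hs⟩)
    · rintro (h1 | (⟨h1, hs⟩ | ⟨q, hq, rfl, hs⟩))
      · exact Or.inl (Or.inl h1)
      · exact Or.inl (Or.inr ⟨hs, h1.symm⟩)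
      · exact Or.inr ⟨q, hq, rfl, hs⟩

-- value at key h after the inner loop of fssShared
theorem fss_shared_inner_getD (hs : List String) (t s : String)
    (sh : PySem.Dict String (List String)) (h : String) :
    (hs.foldl (fun sh h' => if h' == t then sh else sh.modify h' [] (fun st => PySem.Set.add st s)) sh).getD h []
      = if h ∈ hs ∧ h ≠ t then PySem.Set.add (sh.getD h []) s else sh.getD h [] := by
  induction hs generalizing sh with
  | nil => simp
  | cons h' rest ih =>
    simp only [List.foldl_cons]
    rcases eq_or_ne h' t with rfl | hht
    · rw [if_pos (by simp), ih]
      exact if_congr ⟨fun ⟨a, b⟩ => ⟨List.mem_cons_of_mem _ a, b⟩,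
        fun ⟨a, b⟩ => ⟨(List.mem_cons.mp a).resolve_left b, b⟩⟩ rfl rfl
    · rw [if_neg (by simp [hht]), ih, PySem.Dict.getD_modify]
      rcases eq_or_ne h h' with rfl | hhh
      · rw [if_pos rfl]
        by_cases hc : h ∈ rest ∧ h ≠ t
        · rw [if_pos hc, if_pos ⟨List.mem_cons_of_mem _ hc.1, hc.2⟩, fss_set_add_add_self]
        · rw [if_neg hc, if_pos ⟨List.mem_cons_self .., hht⟩]
      · rw [if_neg hhh]
        by_cases hc : h ∈ rest ∧ h ≠ t
        · rw [if_pos hc, if_pos ⟨List.mem_cons_of_mem _ hc.1, hc.2⟩]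
        · rw [if_neg hc, if_neg (fun ⟨a, b⟩ => hc ⟨(List.mem_cons.mp a).resolve_left hhh, b⟩)]

-- presence of key h after the inner loop of fssShared
theorem fss_shared_inner_contains (hs : List String) (t s : String)
    (sh : PySem.Dict String (List String)) (h : String) :
    ((hs.foldl (fun sh h' => if h' == t then sh else sh.modify h' [] (fun st => PySem.Set.add st s)) sh).contains h = true)
      ↔ ((h ∈ hs ∧ h ≠ t) ∨ sh.contains h = true) := by
  induction hs generalizing sh with
  | nil => simp
  | cons h' rest ih =>
    simp only [List.foldl_cons]
    rcases eq_or_ne h' t with rfl | hht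
    · rw [if_pos (by simp), ih]
      constructor
      · rintro (⟨a, b⟩ | c)
        · exact Or.inl ⟨List.mem_cons_of_mem _ a, b⟩
        · exact Or.inr c
      · rintro (⟨a, b⟩ | c)
        · exact Or.inl ⟨(List.mem_cons.mp a).resolve_left b, b⟩
        · exact Or.inr c
    · rw [if_neg (by simp [hht]), ih]
      simp only [PySem.Dict.contains_modify, Bool.or_eq_true, beq_iff_eq]
      constructor
      · rintro (⟨a, b⟩ | (rfl | c))
        · exact Or.inl ⟨List.mem_cons_of_mem _ a, b⟩
        · exact Or.inl ⟨List.mem_cons_self .., hht⟩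
        · exact Or.inr c
      · rintro (⟨a, b⟩ | c)
        · rcases List.mem_cons.mp a with rfl | hr
          · exact Or.inr (Or.inl rfl)
          · exact Or.inl ⟨hr, b⟩
        · exact Or.inr (Or.inr c)

-- value at key h after fssShared's outer loop (generalized accumulator)
theorem fss_shared_getD (ts : List String) (t h : String)
    (o sh : PySem.Dict String (List String)) :
    (ts.foldl (fun sh s =>
        (o.getD s []).foldl (fun sh h' => if h' == t then sh else sh.modify h' [] (fun st => PySem.Set.add st s)) sh) sh).getD h []
      = (ts.filter (fun s => decide (h ∈ o.getD s [] ∧ h ≠ t))).foldl PySem.Set.add (sh.getD h []) := by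
  induction ts generalizing sh with
  | nil => simp
  | cons s rest ih =>
    simp only [List.foldl_cons, List.filter_cons]
    rw [ih, fss_shared_inner_getD]
    by_cases hc : h ∈ o.getD s [] ∧ h ≠ t
    · simp [hc]
    · simp [hc]

theorem fss_shared_contains (ts : List String) (t h : String)
    (o sh : PySem.Dict String (List String)) :
    ((ts.foldl (fun sh s =>
        (o.getD s []).foldl (fun sh h' => if h' == t then sh else sh.modify h' [] (fun st => PySem.Set.add st s)) sh) sh).contains h = true)
      ↔ ((∃ s ∈ ts, h ∈ o.getD s [] ∧ h ≠ t) ∨ sh.contains h = true) := by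
  induction ts generalizing sh with
  | nil => simp
  | cons s rest ih =>
    simp only [List.foldl_cons]
    rw [ih, fss_shared_inner_contains]
    constructor
    · rintro (⟨q, hq, hqo⟩ | (⟨h1, h2⟩ | h1))
      · exact Or.inl ⟨q, List.mem_cons_of_mem _ hq, hqo⟩
      · exact Or.inl ⟨s, List.mem_cons_self .., h1, h2⟩
      · exact Or.inr h1
    · rintro (⟨q, hq, hqo⟩ | h1)
      · rcases List.mem_cons.mp hq with rfl | hq
        · exact Or.inr (Or.inl hqo)
        · exact Or.inl ⟨q, hq, hqo⟩
      · exact Or.inr (Or.inr h1)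

-- ===== VERDICT (by name: the statement is the Claim_ definition above) =====
theorem find_similar_serial_numbers_spec : Claim_equal_find_similar_serial_numbers := by
  intro target_host all_hosts _
  unfold Spec_find_similar_serial_numbers find_similar_serial_numbers find_similar_serial_numbers_alt
  simp only []
  apply congrArg PySem.Dict.items
  set d := PySem.Dict.ofList all_hosts with hd
  set t := PySem.Str.lower target_host with ht
  set T : PySem.Set String := PySem.Set.ofList (d.getD t []) with hT
  have hnd : (d.items.map Prod.fst).Nodup := PySem.Dict.nodup_keys_ofList all_hosts
  apply PySem.List.foldl_congr_mem'
  intro p hp acc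
  by_cases hp1 : p.1 = t
  · -- A skips the target host; shared never contains it
    have hcf : (fssShared t T (fssOwners d.items)).contains t = false := by
      by_contra hcc
      have : (fssShared t T (fssOwners d.items)).contains t = true := by
        cases hcon : (fssShared t T (fssOwners d.items)).contains t
        · exact absurd hcon hcc
        · rfl
      rcases (fss_shared_contains T t t _ _).mp this with ⟨s, _, _, hne⟩ | hemp
      · exact hne rfl
      · rw [PySem.Dict.contains_empty] at hemp; exact Bool.false_ne_true hemp
    simp [hp1, hcf]
  · -- the filtered target set IS A's intersection
    have hbe : (p.1 == t) = false := by simp [hp1]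
    have hmemo : ∀ s : String, s ∈ T →
        ((p.1 ∈ (fssOwners d.items).getD s []) ↔ s ∈ p.2) := by
      intro s _
      unfold fssOwners
      rw [fss_mem_owners]
      constructor
      · rintro (habs | ⟨q, hq, hq1, hqs⟩)
        · rw [PySem.Dict.getD_empty] at habs; exact absurd habs (List.not_mem_nil)
        · have : q = p := List.inj_on_of_nodup_map hnd hq hp hq1
          rw [← this]; exact hqs
      · intro hs; exact Or.inr ⟨p, hp, rfl, hs⟩
    have hfilter : T.filter (fun s => decide (p.1 ∈ (fssOwners d.items).getD s [] ∧ p.1 ≠ t))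
        = PySem.Set.inter T (PySem.Set.ofList p.2) := by
      show _ = T.filter (fun s => (PySem.Set.ofList p.2).contains s)
      apply List.filter_congr
      intro s hs
      have h1 := hmemo s hs
      by_cases h2 : s ∈ p.2
      · have hcontains : (PySem.Set.ofList p.2).contains s = true :=
          (PySem.Set.contains_iff _ _).mpr ((PySem.Set.mem_ofList p.2 s).mpr h2)
        simp [h1.mpr h2, hp1, h2]
      · have hcontains : (PySem.Set.ofList p.2).contains s = false := by
          cases hcon : (PySem.Set.ofList p.2).contains s
          · rfl
          · exact absurd ((PySem.Set.mem_ofList p.2 s).mp ((PySem.Set.contains_iff _ _).mp hcon)) h2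
        have hno : ¬ p.1 ∈ (fssOwners d.items).getD s [] := fun hm => h2 (h1.mp hm)
        simp [hno, h2]
    have hgetD : (fssShared t T (fssOwners d.items)).getD p.1 []
        = PySem.Set.inter T (PySem.Set.ofList p.2) := by
      unfold fssShared
      rw [fss_shared_getD, PySem.Dict.getD_empty, ← PySem.Set.ofList_eq_foldl, hfilter,
        PySem.Set.ofList_eq_self_of_nodup]
      exact (PySem.Set.nodup_inter T _ (PySem.Set.nodup_ofList _))
    have hcont : ((fssShared t T (fssOwners d.items)).contains p.1 = true)
        ↔ ¬ (PySem.Set.inter T (PySem.Set.ofList p.2)).isEmpty := by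
      unfold fssShared
      rw [fss_shared_contains]
      rw [PySem.Dict.contains_empty]
      simp only [Bool.false_eq_true, or_false]
      rw [← hfilter]
      constructor
      · rintro ⟨s, hsT, hso, hsne⟩ hemp
        have hmemf : s ∈ T.filter (fun s => decide (p.1 ∈ (fssOwners d.items).getD s [] ∧ p.1 ≠ t)) :=
          List.mem_filter.mpr ⟨hsT, decide_eq_true ⟨hso, hsne⟩⟩
        simp only [List.isEmpty_iff] at hemp
        rw [hemp] at hmemf
        exact absurd hmemf (List.not_mem_nil)
      · intro hne
        have hne' : T.filter (fun s => decide (p.1 ∈ (fssOwners d.items).getD s [] ∧ p.1 ≠ t)) ≠ [] := by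
          intro h0
          exact hne (by rw [h0]; rfl)
        rcases List.exists_mem_of_ne_nil _ hne' with ⟨s, hsmem⟩
        rcases List.mem_filter.mp hsmem with ⟨hsT, hdec⟩
        rcases of_decide_eq_true hdec with ⟨hso, hsne⟩
        exact ⟨s, hsT, hso, hsne⟩
    by_cases hemp : (PySem.Set.inter T (PySem.Set.ofList p.2)).isEmpty
    · have : (fssShared t T (fssOwners d.items)).contains p.1 = false := by
        cases hcon : (fssShared t T (fssOwners d.items)).contains p.1
        · rfl
        · exact absurd hemp (hcont.mp hcon)
      simp [hbe, hemp, this]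
    · have : (fssShared t T (fssOwners d.items)).contains p.1 = true := hcont.mpr hemp
      simp [hbe, hemp, this, hgetD]
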